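-- pv_equiv track=rewrite | github.com/dvlprsh/PS | Programmers/코딩테스트 고득점 Kit/Heap/더 맵게(lv2).py | solution
-- ===== SOURCE A (Python) =====
-- import heapq
-- import heapq
--
-- def solution(scoville, K):
--     answer = 0
--     heapq.heapify(scoville)
--     s1 = heapq.heappop(scoville)
--     if s1 >= K:
--         return 0
--     while len(scoville) > 0:
--         answer += 1
--         s2 = heapq.heappop(scoville)
--         new_scov = s1 + (s2 * 2)
--         heapq.heappush(scoville, new_scov)
--         s1 = heapq.heappop(scoville)
--         if s1 >= K:
--             return answer
--     return -1
-- ===== SOURCE B (Python) =====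
-- def solution(scoville, K):
--     # Sort once, then pop heads from a sorted list and insert each mix in order
--     # (ordered-list approach instead of a heap).  Return value only: A heapifies
--     # its argument in place; B leaves the argument untouched.
--     lst = sorted(scoville)
--     s1 = lst.pop(0)
--     if s1 >= K:
--         return 0
--     answer = 0
--     while lst:
--         answer += 1
--         s2 = lst.pop(0)
--         v = s1 + 2 * s2
--         i = 0
--         while i < len(lst) and lst[i] <= v:
--             i += 1
--         lst.insert(i, v)
--         s1 = lst.pop(0)
--         if s1 >= K:
--             return answer
--     return -1
-- ===== Notes on version B (the rewrite author's own statement) =====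
-- stated objective: simpler
-- what changed: Replaces heapq with a plain sorted list: sort once, pop minima from the head, and insert each mixed value back at its ordered position; the heap disappears entirely.
import Mathlib
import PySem

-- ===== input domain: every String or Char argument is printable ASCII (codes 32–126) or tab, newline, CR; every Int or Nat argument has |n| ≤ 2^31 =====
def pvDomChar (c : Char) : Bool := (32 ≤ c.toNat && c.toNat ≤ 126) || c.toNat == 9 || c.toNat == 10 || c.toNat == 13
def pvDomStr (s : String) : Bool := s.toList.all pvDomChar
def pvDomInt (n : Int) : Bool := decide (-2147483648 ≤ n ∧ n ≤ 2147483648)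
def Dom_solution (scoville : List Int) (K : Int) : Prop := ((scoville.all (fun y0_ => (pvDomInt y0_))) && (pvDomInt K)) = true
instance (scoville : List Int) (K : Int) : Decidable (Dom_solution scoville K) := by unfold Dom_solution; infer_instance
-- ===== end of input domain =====

-- B replaces A's heap by one sort plus ordered insertion (same greedy sequence);
-- equivalence is about the RETURN value only: A heapifies its argument in place, B does not mutate it.

-- ===== PORT A =====
-- PySem has no heapq, so heapq is hand-ported by its contract: heappop returns the
-- multiset minimum (the value is uniquely determined, so this is exact for every
-- value A returns) and removes one occurrence of it; heapify only rearranges the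
-- list, which the minimum-extraction model absorbs; heappush adds the element.
def heapPop (xs : List Int) : Option (Int × List Int) :=
  match PySem.List.min? xs (fun x => x) with
  | none => none                 -- IndexError in Python
  | some m => some (m, xs.erase m)

-- the while-loop of A; fuel = current length of the heap (one element is consumed per pass)
def solutionLoop (K : Int) : Nat → Int → Int → List Int → Int
  | 0, _, _, _ => -1
  | fuel + 1, answer, s1, rest =>
    match rest with
    | [] => -1
    | _ :: _ =>
      match heapPop rest with
      | none => -1               -- unreachable: rest ≠ []
      | some (s2, r2) =>
        match heapPop ((s1 + s2 * 2) :: r2) with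
        | none => -1             -- unreachable: the pushed list is nonempty
        | some (s1', r3) =>
          if s1' ≥ K then answer + 1 else solutionLoop K fuel (answer + 1) s1' r3

def solution (scoville : List Int) (K : Int) : Int :=
  match heapPop scoville with
  | none => 0                    -- unreachable under Pre_: heappop of [] raises IndexError
  | some (s1, rest) => if s1 ≥ K then 0 else solutionLoop K rest.length 0 s1 rest

-- ===== PORT B =====
-- literal port of Source B's insertion scan: walk past the elements ≤ v, insert v there
def insertSorted (v : Int) : List Int → List Int
  | [] => [v]
  | x :: xs => if x ≤ v then x :: insertSorted v xs else v :: x :: xs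

-- the while-loop of B over the sorted list (heads are the minima); fuel as in A's loop
def altLoop (K : Int) : Nat → Int → Int → List Int → Int
  | 0, _, _, _ => -1
  | fuel + 1, answer, s1, lst =>
    match lst with
    | [] => -1
    | s2 :: r2 =>
      match insertSorted (s1 + 2 * s2) r2 with
      | [] => -1                 -- unreachable: insertSorted never returns []
      | s1' :: r3 =>
        if s1' ≥ K then answer + 1 else altLoop K fuel (answer + 1) s1' r3

def solution_alt (scoville : List Int) (K : Int) : Int :=
  match PySem.List.sorted scoville (fun x => x) false with
  | [] => 0                      -- unreachable under Pre_: lst.pop(0) of [] raises IndexError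
  | s1 :: lst => if s1 ≥ K then 0 else altLoop K lst.length 0 s1 lst

-- ===== PRECONDITION & SPEC =====
-- Pre_ excludes only the empty list, on which A raises IndexError (and B too).
def Pre_solution (scoville : List Int) (K : Int) : Prop := scoville ≠ []
instance (scoville : List Int) (K : Int) : Decidable (Pre_solution scoville K) := by unfold Pre_solution; infer_instance
def pvWitness_solution : List Int × Int := ([1, 2, 9], 7)

def Spec_solution (scoville : List Int) (K : Int) (out : Int) : Prop := out = solution_alt scoville K
instance (scoville : List Int) (K : Int) (out : Int) : Decidable (Spec_solution scoville K out) := by unfold Spec_solution; infer_instance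

-- ===== CLAIM (what is proved, stated in full; the proofs are below) =====
def Claim_equal_solution : Prop := ∀ (scoville : List Int) (K : Int), Dom_solution scoville K → Pre_solution scoville K → Spec_solution scoville K (solution scoville K)

-- ===== LEMMAS AND PROOFS =====

theorem insertSorted_perm (v : Int) (t : List Int) : (insertSorted v t).Perm (v :: t) := by
  induction t with
  | nil => simp [insertSorted]
  | cons x xs ih =>
    simp only [insertSorted]
    split
    · exact (ih.cons x).trans (List.Perm.swap v x xs)
    · exact List.Perm.refl _

theorem insertSorted_pairwise (v : Int) (t : List Int) (h : t.Pairwise (· ≤ ·)) :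
    (insertSorted v t).Pairwise (· ≤ ·) := by
  induction t with
  | nil => simp [insertSorted]
  | cons x xs ih =>
    rcases List.pairwise_cons.mp h with ⟨hx, hxs⟩
    simp only [insertSorted]
    split
    · rename_i hxv
      refine List.pairwise_cons.mpr ⟨?_, ih hxs⟩
      intro y hy
      rcases List.mem_cons.mp ((insertSorted_perm v xs).mem_iff.mp hy) with rfl | hm
      · exact hxv
      · exact hx y hm
    · rename_i hxv
      refine List.pairwise_cons.mpr ⟨?_, h⟩
      intro y hy
      rcases List.mem_cons.mp hy with rfl | hm
      · omega
      · exact le_trans (by omega) (hx y hm)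

-- the extract-min step, read off the sorted version of the multiset
theorem popSorted (xs : List Int) (m : Int) (t : List Int)
    (h : PySem.List.sorted xs (fun x => x) false = m :: t) :
    heapPop xs = some (m, xs.erase m) ∧
    PySem.List.sorted (xs.erase m) (fun x => x) false = t ∧
    (xs.erase m).length = t.length := by
  have hperm : (m :: t).Perm xs := h ▸ PySem.List.sorted_perm xs (fun x => x) false
  have hmem : m ∈ xs := hperm.mem_iff.mp (List.mem_cons_self)
  have hmin : ∀ y ∈ xs, m ≤ y := by
    intro y hy
    simpa using PySem.List.key_head_sorted_le _ (fun x => x) h y hy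
  have hxs : xs ≠ [] := by intro hnil; subst hnil; simp at hmem
  obtain ⟨m', hm'⟩ : ∃ m', PySem.List.min? xs (fun x => x) = some m' := by
    cases heq : PySem.List.min? xs (fun x => x) with
    | none => exact absurd ((PySem.List.min?_eq_none_iff xs (fun x => x)).mp heq) hxs
    | some m' => exact ⟨m', rfl⟩
  have hmEq : m' = m := by
    have h1 : m' ∈ xs := PySem.List.min?_mem hm'
    have h2 : ∀ y ∈ xs, m' ≤ y := by
      intro y hy
      simpa using PySem.List.min?_isMin hm' y hy
    exact le_antisymm (h2 m hmem) (hmin m' h1)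
  subst hmEq
  have hepm : t.Perm (xs.erase m') := by
    have := hperm.erase m'
    simpa using this
  have hpair : t.Pairwise (· ≤ ·) := by
    have := PySem.List.sorted_pairwise xs (fun x => x)
    rw [h] at this
    exact (List.pairwise_cons.mp this).2
  refine ⟨by simp [heapPop, hm'], ?_, hepm.symm.length_eq⟩
  exact PySem.List.sorted_id_eq_of_perm_of_pairwise _ _ hepm hpair

theorem loop_eq (K : Int) (fuel : Nat) : ∀ (answer s1 : Int) (rest lst : List Int),
    PySem.List.sorted rest (fun x => x) false = lst →
    solutionLoop K fuel answer s1 rest = altLoop K fuel answer s1 lst := by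
  induction fuel with
  | zero => intro answer s1 rest lst _; rfl
  | succ n ih =>
    intro answer s1 rest lst hsort
    cases rest with
    | nil =>
      have : lst = [] := by simpa using hsort.symm
      subst this; rfl
    | cons a as =>
      obtain ⟨s2, r2, hl⟩ : ∃ s2 r2, lst = s2 :: r2 := by
        cases hc : lst with
        | nil =>
          rw [hc] at hsort
          exact absurd ((PySem.List.sorted_eq_nil_iff _ _ _).mp hsort) (by simp)
        | cons s2 r2 => exact ⟨s2, r2, rfl⟩
      subst hl
      obtain ⟨hpop, hst, _⟩ := popSorted (a :: as) s2 r2 hsort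
      have hpair_r2 : r2.Pairwise (· ≤ ·) := by
        have := PySem.List.sorted_pairwise (a :: as) (fun x => x)
        rw [hsort] at this
        exact (List.pairwise_cons.mp this).2
      set eA := (a :: as).erase s2 with heA
      set v := s1 + s2 * 2 with hv
      have hv2 : s1 + 2 * s2 = v := by rw [hv]; ring
      -- sorted (v :: eA) = insertSorted v r2
      have hmsort : PySem.List.sorted (v :: eA) (fun x => x) false = insertSorted v r2 := by
        have hp1 : (insertSorted v r2).Perm (v :: eA) := by
          refine (insertSorted_perm v r2).trans (List.Perm.cons v ?_)
          have : r2.Perm eA := by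
            rw [← hst]; exact PySem.List.sorted_perm eA (fun x => x) false
          exact this
        exact PySem.List.sorted_id_eq_of_perm_of_pairwise _ _ hp1 (insertSorted_pairwise v r2 hpair_r2)
      obtain ⟨s1', r3, hm⟩ : ∃ s1' r3, insertSorted v r2 = s1' :: r3 := by
        cases hc : insertSorted v r2 with
        | nil =>
          have := (insertSorted_perm v r2).length_eq
          rw [hc] at this; simp at this
        | cons s1' r3 => exact ⟨s1', r3, rfl⟩
      obtain ⟨hpop2, hst2, _⟩ := popSorted (v :: eA) s1' r3 (by rw [hmsort, hm])
      show solutionLoop K (n+1) answer s1 (a :: as) = altLoop K (n+1) answer s1 (s2 :: r2)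
      rw [solutionLoop, altLoop]
      simp only [hpop, hv2, hm, ← hv, hpop2]
      split
      · rfl
      · exact ih (answer + 1) s1' ((v :: eA).erase s1') r3 hst2

-- ===== VERDICT (by name: the statement is the Claim_ definition above) =====
theorem solution_spec : Claim_equal_solution := by
  intro scoville K _ hpre
  unfold Spec_solution solution solution_alt
  cases hs : PySem.List.sorted scoville (fun x => x) false with
  | nil => exact absurd ((PySem.List.sorted_eq_nil_iff _ _ _).mp hs) hpre
  | cons s1 lst =>
    obtain ⟨hpop, hst, hlen⟩ := popSorted scoville s1 lst hs
    rw [hpop]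
    simp only
    split
    · rfl
    · rw [hlen]
      exact loop_eq K lst.length 0 s1 (scoville.erase s1) lst hst
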